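-- pv_equiv track=rewrite | github.com/ataboadanunez/meiga | src/Analysis/G4HodoscopeSimulator_Analysis.py | ConvertBinaryPixel
-- ===== SOURCE A (Python) =====
-- def ConvertBinaryPixel(value, matrix, nBars=12):
-- 	"""
-- 	Add description
-- 	"""
-- 	binary_x = value[0:nBars]
-- 	binary_y = value[nBars:2*nBars]
--
-- 	# find pixel number iterating from last element
-- 	for i, itemi in enumerate(binary_x):
-- 		for j, itemj in enumerate(binary_y):
-- 			if (itemi == '1') & (itemj == '1'):
-- 				matrix[i][j] += 1
--
-- 	return matrix
-- ===== SOURCE B (Python) =====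
-- def ConvertBinaryPixel(value, matrix, nBars=12):
-- 	"""
-- 	Rebuild the matrix functionally: precompute the set-bit index sets of the
-- 	two binary halves, then add an indicator to every cell whose row and column
-- 	indices are both set. Does not mutate the input matrix (A mutates in place);
-- 	the returned value is the same.
-- 	"""
-- 	xset = {i for i, c in enumerate(value[0:nBars]) if c == '1'}
-- 	yset = {j for j, c in enumerate(value[nBars:2 * nBars]) if c == '1'}
-- 	return [[v + (1 if i in xset and j in yset else 0) for j, v in enumerate(row)]
-- 	        for i, row in enumerate(matrix)]
-- ===== Notes on version B (the rewrite author's own statement) =====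
-- stated objective: faster
-- what changed: B precomputes the set-bit index sets of each binary half once and rebuilds the matrix with a pure nested comprehension adding an indicator per cell, instead of A's full cross-product character scan with per-cell in-place mutation; B does not mutate the input matrix (return values are identical).
import Mathlib
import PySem

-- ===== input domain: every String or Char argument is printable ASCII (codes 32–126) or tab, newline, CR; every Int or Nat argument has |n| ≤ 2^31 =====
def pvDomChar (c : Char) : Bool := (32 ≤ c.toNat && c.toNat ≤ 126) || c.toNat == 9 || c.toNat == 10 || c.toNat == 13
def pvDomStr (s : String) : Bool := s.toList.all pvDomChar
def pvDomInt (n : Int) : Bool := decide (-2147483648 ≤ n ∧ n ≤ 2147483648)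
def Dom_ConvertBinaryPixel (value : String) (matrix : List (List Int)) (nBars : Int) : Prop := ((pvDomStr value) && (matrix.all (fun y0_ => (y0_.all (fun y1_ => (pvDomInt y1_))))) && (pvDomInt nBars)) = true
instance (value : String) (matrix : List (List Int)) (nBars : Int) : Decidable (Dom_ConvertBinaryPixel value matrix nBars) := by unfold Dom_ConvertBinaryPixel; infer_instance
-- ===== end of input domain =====

-- B rebuilds the matrix functionally from precomputed set-bit index sets instead of A's
-- in-place nested scan (B does not mutate its argument; equal RETURN values are what is proved).
-- ===== PORT A =====
def ConvertBinaryPixel (value : String) (matrix : List (List Int)) (nBars : Int) : List (List Int) :=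
  let binary_x := PySem.List.slice value.toList (some 0) (some nBars)
  let binary_y := PySem.List.slice value.toList (some nBars) (some (2 * nBars))
  -- matrix[i][j] += 1 ported with the total forms pyGetD/pySetD; exact under Pre_ (indices in range)
  (PySem.List.enumerate binary_x 0).foldl (fun m p =>
    (PySem.List.enumerate binary_y 0).foldl (fun m q =>
      if (p.2 == '1') && (q.2 == '1') then
        PySem.List.pySetD m p.1 (PySem.List.pySetD (PySem.List.pyGetD m p.1 []) q.1
          (PySem.List.pyGetD (PySem.List.pyGetD m p.1 []) q.1 0 + 1))
      else m) m) matrix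

-- ===== PORT B =====
def ConvertBinaryPixel_alt (value : String) (matrix : List (List Int)) (nBars : Int) : List (List Int) :=
  let xset : PySem.Set Int := PySem.Set.ofList
    ((PySem.List.enumerate (PySem.List.slice value.toList (some 0) (some nBars)) 0).filterMap
      (fun p => if p.2 == '1' then some p.1 else none))
  let yset : PySem.Set Int := PySem.Set.ofList
    ((PySem.List.enumerate (PySem.List.slice value.toList (some nBars) (some (2 * nBars))) 0).filterMap
      (fun q => if q.2 == '1' then some q.1 else none))
  (PySem.List.enumerate matrix 0).map (fun p =>
    (PySem.List.enumerate p.2 0).map (fun q =>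
      q.2 + (if xset.contains p.1 && yset.contains q.1 then 1 else 0)))

-- ===== PRECONDITION & SPEC =====
-- Pre_ admits exactly the inputs where Python A returns: every pair of '1' bits
-- (one per half) must index an existing cell of the (possibly ragged) matrix.
def Pre_ConvertBinaryPixel (value : String) (matrix : List (List Int)) (nBars : Int) : Prop :=
  ∀ i < (PySem.List.slice value.toList (some 0) (some nBars)).length,
    ∀ j < (PySem.List.slice value.toList (some nBars) (some (2 * nBars))).length,
      (PySem.List.slice value.toList (some 0) (some nBars))[i]? = some '1' →
      (PySem.List.slice value.toList (some nBars) (some (2 * nBars)))[j]? = some '1' →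
      j < (matrix.getD i []).length
instance (value : String) (matrix : List (List Int)) (nBars : Int) : Decidable (Pre_ConvertBinaryPixel value matrix nBars) := by unfold Pre_ConvertBinaryPixel; infer_instance

def pvWitness_ConvertBinaryPixel : String × List (List Int) × Int := ("11", [[0]], 1)

def Spec_ConvertBinaryPixel (value : String) (matrix : List (List Int)) (nBars : Int) (out : List (List Int)) : Prop := out = ConvertBinaryPixel_alt value matrix nBars
instance (value : String) (matrix : List (List Int)) (nBars : Int) (out : List (List Int)) : Decidable (Spec_ConvertBinaryPixel value matrix nBars out) := by unfold Spec_ConvertBinaryPixel; infer_instance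

-- ===== CLAIM (what is proved, stated in full; the proofs are below) =====
def Claim_equal_ConvertBinaryPixel : Prop := ∀ (value : String) (matrix : List (List Int)) (nBars : Int), Dom_ConvertBinaryPixel value matrix nBars → Pre_ConvertBinaryPixel value matrix nBars → Spec_ConvertBinaryPixel value matrix nBars (ConvertBinaryPixel value matrix nBars)

-- ===== LEMMAS AND PROOFS =====

def pvRStep (row : List Int) (q : Int × Char) : List Int :=
  if q.2 == '1' then PySem.List.pySetD row q.1 (PySem.List.pyGetD row q.1 0 + 1) else row

theorem pvRowFold_getElem? (ys : List Char) (s : Nat) (row : List Int) (c : Nat) :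
    ((PySem.List.enumerate ys (s : Int)).foldl pvRStep row)[c]? =
      row[c]?.map (fun v => v + if s ≤ c ∧ ys[c - s]? = some '1' then 1 else 0) := by
  induction ys generalizing s row with
  | nil =>
      simp only [PySem.List.enumerate_nil, List.foldl_nil, List.getElem?_nil]
      cases row[c]? <;> simp
  | cons y ys ih =>
      rw [PySem.List.enumerate_cons]
      simp only [List.foldl_cons]
      have hs1 : ((s : Int) + 1) = ((s + 1 : Nat) : Int) := by push_cast; ring
      rw [hs1, ih]
      simp only [pvRStep, PySem.List.pySetD_natCast, PySem.List.pyGetD_natCast]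
      by_cases hcs : s = c
      · subst hcs
        have hf : ¬ (s + 1 ≤ s) := by omega
        by_cases hy : y = '1'
        · subst hy
          simp only [beq_self_eq_true, Bool.and_self, if_true, List.getElem?_set, if_pos rfl]
          by_cases hlt : s < row.length
          · simp [hlt, hf, List.getD_eq_getElem?_getD, List.getElem?_eq_getElem hlt, Nat.sub_self]
          · simp [hlt, hf, List.getElem?_eq_none (by omega : row.length ≤ s)]
        · have hyb : (y == '1') = false := by simp [hy]
          simp [hyb, hf, Nat.sub_self, hy]
      · have hrow : (if (y == '1') = true then row.set s (row.getD s 0 + 1) else row)[c]? = row[c]? := by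
          split
          · rw [List.getElem?_set, if_neg hcs]
          · rfl
        rw [hrow]
        by_cases hle : s + 1 ≤ c
        · have h1 : c - s = (c - (s + 1)) + 1 := by omega
          simp [h1, hle, show s ≤ c by omega]
        · have h2 : ¬ s ≤ c := by omega
          simp [hle, h2]

theorem pvSet_getD_self (m : List (List Int)) (n : Nat) : m.set n (m.getD n []) = m := by
  apply List.ext_getElem?
  intro k
  rw [List.getElem?_set]
  by_cases h : n = k
  · subst h
    by_cases hlt : n < m.length
    · simp [hlt, List.getD_eq_getElem?_getD, List.getElem?_eq_getElem hlt]
    · simp [hlt]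
  · simp [h]

theorem pvRStep_nil (s : Nat) (y : Char) : pvRStep [] ((s : Int), y) = [] := by
  unfold pvRStep
  simp [PySem.List.pySetD_natCast]

theorem pvInnerFold_eq_set (ys : List Char) (s n : Nat) (m : List (List Int)) :
    (PySem.List.enumerate ys (s : Int)).foldl (fun m q =>
        if q.2 == '1' then
          PySem.List.pySetD m (n : Int) (PySem.List.pySetD (PySem.List.pyGetD m (n : Int) []) q.1
            (PySem.List.pyGetD (PySem.List.pyGetD m (n : Int) []) q.1 0 + 1))
        else m) m =
      m.set n ((PySem.List.enumerate ys (s : Int)).foldl pvRStep (m.getD n [])) := by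
  induction ys generalizing s m with
  | nil =>
      simp only [PySem.List.enumerate_nil, List.foldl_nil]
      exact (pvSet_getD_self m n).symm
  | cons y ys ih =>
      rw [PySem.List.enumerate_cons]
      simp only [List.foldl_cons]
      have hs1 : ((s : Int) + 1) = ((s + 1 : Nat) : Int) := by push_cast; ring
      rw [hs1, ih]
      have hstep : (if (y == '1') = true then
          PySem.List.pySetD m (n : Int) (PySem.List.pySetD (PySem.List.pyGetD m (n : Int) []) ((s : Int))
            (PySem.List.pyGetD (PySem.List.pyGetD m (n : Int) []) ((s : Int)) 0 + 1))
          else m) = m.set n (pvRStep (m.getD n []) ((s : Int), y)) := by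
        unfold pvRStep
        simp only [PySem.List.pySetD_natCast, PySem.List.pyGetD_natCast]
        split
        · rfl
        · rw [pvSet_getD_self]
      rw [hstep]
      have hgd : (m.set n (pvRStep (m.getD n []) ((s : Int), y))).getD n [] = pvRStep (m.getD n []) ((s : Int), y) := by
        by_cases hlt : n < m.length
        · rw [List.getD_eq_getElem?_getD, List.getElem?_set, if_pos rfl, if_pos hlt]
          rfl
        · rw [List.getD_eq_getElem?_getD, List.getElem?_eq_none (by simpa using (by omega : m.length ≤ n))]
          have : m.getD n [] = [] := by
            rw [List.getD_eq_getElem?_getD, List.getElem?_eq_none (by omega : m.length ≤ n)]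
            rfl
          rw [this, pvRStep_nil]
          rfl
      rw [hgd, List.set_set]

theorem pvFoldl_id {α β : Type} (l : List α) (b : β) : l.foldl (fun b _ => b) b = b := by
  induction l generalizing b with
  | nil => rfl
  | cons x xs ih => simp [List.foldl_cons, ih]

theorem pvOuterFold_getElem? (ys : List Char) (xs : List Char) (s : Nat) (m : List (List Int)) (r : Nat) :
    ((PySem.List.enumerate xs (s : Int)).foldl (fun m p =>
        (PySem.List.enumerate ys (0 : Int)).foldl (fun m q =>
          if (p.2 == '1') && (q.2 == '1') then
            PySem.List.pySetD m p.1 (PySem.List.pySetD (PySem.List.pyGetD m p.1 []) q.1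
              (PySem.List.pyGetD (PySem.List.pyGetD m p.1 []) q.1 0 + 1))
          else m) m) m)[r]? =
      m[r]?.map (fun row => if s ≤ r ∧ xs[r - s]? = some '1' then
        (PySem.List.enumerate ys (0 : Int)).foldl pvRStep row else row) := by
  induction xs generalizing s m with
  | nil =>
      simp only [PySem.List.enumerate_nil, List.foldl_nil, List.getElem?_nil]
      cases m[r]? <;> simp
  | cons x xs ih =>
      rw [PySem.List.enumerate_cons]
      simp only [List.foldl_cons]
      have hs1 : ((s : Int) + 1) = ((s + 1 : Nat) : Int) := by push_cast; ring
      rw [hs1, ih]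
      by_cases hx : x = '1'
      · subst hx
        have hstep : ((PySem.List.enumerate ys (0 : Int)).foldl (fun m q =>
            if (('1' : Char) == '1') && (q.2 == '1') then
              PySem.List.pySetD m ((s : Int)) (PySem.List.pySetD (PySem.List.pyGetD m ((s : Int)) []) q.1
                (PySem.List.pyGetD (PySem.List.pyGetD m ((s : Int)) []) q.1 0 + 1))
            else m) m) = m.set s ((PySem.List.enumerate ys (0 : Int)).foldl pvRStep (m.getD s [])) := by
          have h0 : ((0 : Int)) = ((0 : Nat) : Int) := by norm_num
          rw [h0]
          simp only [beq_self_eq_true, Bool.true_and]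
          exact pvInnerFold_eq_set ys 0 s m
        rw [hstep]
        by_cases hrs : s = r
        · subst hrs
          rw [List.getElem?_set, if_pos rfl]
          by_cases hlt : s < m.length
          · simp [hlt, List.getD_eq_getElem?_getD, List.getElem?_eq_getElem hlt, Nat.sub_self,
              show ¬ s + 1 ≤ s by omega]
          · simp [hlt, List.getElem?_eq_none (by omega : m.length ≤ s)]
        · rw [List.getElem?_set, if_neg hrs]
          by_cases hle : s + 1 ≤ r
          · have h1 : r - s = (r - (s + 1)) + 1 := by omega
            simp [h1, hle, show s ≤ r by omega]
          · have h2 : ¬ s ≤ r := by omega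
            simp [hle, h2]
      · have hxb : (x == '1') = false := by simp [hx]
        simp only [hxb, Bool.false_and, if_false, pvFoldl_id]
        by_cases hle : s + 1 ≤ r
        · have h1 : r - s = (r - (s + 1)) + 1 := by omega
          simp [h1, hle, show s ≤ r by omega]
        · by_cases hrs : s = r
          · subst hrs
            simp [Nat.sub_self, hx, show ¬ s + 1 ≤ s by omega]
          · have h2 : ¬ s ≤ r := by omega
            simp [hle, h2]

theorem pvMem_bridge (xs : List Char) (r : Nat) :
    ((PySem.Set.ofList ((PySem.List.enumerate xs (0 : Int)).filterMap
        (fun p => if p.2 == '1' then some p.1 else none))).contains ((r : Nat) : Int) = true) ↔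
      xs[r]? = some '1' := by
  rw [PySem.Set.contains_iff, PySem.Set.mem_ofList, List.mem_filterMap]
  constructor
  · rintro ⟨p, hp, hf⟩
    rw [PySem.List.mem_enumerate_iff] at hp
    obtain ⟨k, hk, rfl⟩ := hp
    simp only [] at hf
    split at hf
    · rename_i h1
      have : ((0 : Int) + k) = ((r : Nat) : Int) := by injection hf
      have hkr : k = r := by omega
      subst hkr
      rw [List.getElem?_eq_getElem hk]
      simpa using h1
    · exact absurd hf (by simp)
  · intro h
    have hk : r < xs.length := by
      by_contra hc
      rw [List.getElem?_eq_none (by omega)] at h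
      simp at h
    refine ⟨((0 : Int) + r, xs[r]), ?_, ?_⟩
    · rw [PySem.List.mem_enumerate_iff]
      exact ⟨r, hk, rfl⟩
    · have : xs[r] = '1' := by
        rw [List.getElem?_eq_getElem hk] at h
        injection h
      simp [this]

theorem pvOuterFold_zero (ys : List Char) (xs : List Char) (m : List (List Int)) (r : Nat) :
    ((PySem.List.enumerate xs (0 : Int)).foldl (fun m p =>
        (PySem.List.enumerate ys (0 : Int)).foldl (fun m q =>
          if (p.2 == '1') && (q.2 == '1') then
            PySem.List.pySetD m p.1 (PySem.List.pySetD (PySem.List.pyGetD m p.1 []) q.1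
              (PySem.List.pyGetD (PySem.List.pyGetD m p.1 []) q.1 0 + 1))
          else m) m) m)[r]? =
      m[r]?.map (fun row => if xs[r]? = some '1' then
        (PySem.List.enumerate ys (0 : Int)).foldl pvRStep row else row) := by
  have h := pvOuterFold_getElem? ys xs 0 m r
  simpa using h

theorem pvRowFold_zero (ys : List Char) (row : List Int) (c : Nat) :
    ((PySem.List.enumerate ys (0 : Int)).foldl pvRStep row)[c]? =
      row[c]?.map (fun v => v + if ys[c]? = some '1' then 1 else 0) := by
  have h := pvRowFold_getElem? ys 0 row c
  simpa using h

theorem pvMain (value : String) (matrix : List (List Int)) (nBars : Int) :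
    ConvertBinaryPixel value matrix nBars = ConvertBinaryPixel_alt value matrix nBars := by
  simp only [ConvertBinaryPixel, ConvertBinaryPixel_alt]
  apply List.ext_getElem?
  intro r
  rw [pvOuterFold_zero, List.getElem?_map, PySem.List.getElem?_enumerate, Option.map_map]
  cases hm : matrix[r]? with
  | none => rfl
  | some row =>
      simp only [Option.map_some, Option.some.injEq, Function.comp]
      apply List.ext_getElem?
      intro c
      rw [List.getElem?_map, PySem.List.getElem?_enumerate]
      by_cases hxr : (PySem.List.slice value.toList (some 0) (some nBars))[r]? = some '1'
      · rw [if_pos hxr, pvRowFold_zero]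
        have hcx := (pvMem_bridge (PySem.List.slice value.toList (some 0) (some nBars)) r).mpr hxr
        cases hv : row[c]? with
        | none => rfl
        | some v =>
            simp only [Option.map_some, Option.some.injEq]
            by_cases hyc : (PySem.List.slice value.toList (some nBars) (some (2 * nBars)))[c]? = some '1'
            · have hcy := (pvMem_bridge (PySem.List.slice value.toList (some nBars) (some (2 * nBars))) c).mpr hyc
              rw [if_pos hyc]
              simp only [zero_add, hcx, hcy, Bool.and_self, if_true]
            · have hcy : ((PySem.Set.ofList ((PySem.List.enumerate (PySem.List.slice value.toList (some nBars) (some (2 * nBars))) (0 : Int)).filterMap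
                  (fun q => if q.2 == '1' then some q.1 else none))).contains ((c : Nat) : Int)) = false := by
                rw [← Bool.not_eq_true]
                intro h
                exact hyc ((pvMem_bridge _ c).mp h)
              rw [if_neg hyc]
              simp only [zero_add, hcx, hcy, Bool.and_false, if_false]
              norm_num
      · rw [if_neg hxr]
        have hcx : ((PySem.Set.ofList ((PySem.List.enumerate (PySem.List.slice value.toList (some 0) (some nBars)) (0 : Int)).filterMap
            (fun p => if p.2 == '1' then some p.1 else none))).contains ((r : Nat) : Int)) = false := by
          rw [← Bool.not_eq_true]
          intro h
          exact hxr ((pvMem_bridge _ r).mp h)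
        cases hv : row[c]? with
        | none => rfl
        | some v =>
            simp only [Option.map_some, Option.some.injEq, zero_add, hcx, Bool.false_and, if_false]
            norm_num

-- ===== VERDICT (by name: the statement is the Claim_ definition above) =====
theorem ConvertBinaryPixel_spec : Claim_equal_ConvertBinaryPixel := by
  intro value matrix nBars _ _
  unfold Spec_ConvertBinaryPixel
  exact pvMain value matrix nBars
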